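-- pv_equiv track=rewrite | github.com/abihi/Advent-of-Code-2020 | day10/day10.py | find_differences
-- ===== SOURCE A (Python) =====
-- def find_differences(sorted_adapters):
--     diff1 = 0
--     diff3 = 1
--     for i in range(len(sorted_adapters) - 1):
--         diff = abs(sorted_adapters[i] - sorted_adapters[i+1])
--         if diff == 1:
--             diff1 += 1
--         elif diff == 3:
--             diff3 += 1
--     return diff1, diff3
-- ===== SOURCE B (Python) =====
-- def find_differences(sorted_adapters):
--     # Divide and conquer over the gap indices [lo, hi): split the segment at
--     # the midpoint, count 1-gaps and 3-gaps in each half, and add the results.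
--     n = len(sorted_adapters)
--     if n < 2:
--         return (0, 1)
--
--     def go(lo, hi):
--         if hi - lo == 1:
--             d = abs(sorted_adapters[lo] - sorted_adapters[hi])
--             return (1 if d == 1 else 0, 1 if d == 3 else 0)
--         mid = (lo + hi) // 2
--         a1, a3 = go(lo, mid)
--         b1, b3 = go(mid, hi)
--         return (a1 + b1, a3 + b3)
--
--     d1, d3 = go(0, n - 1)
--     return (d1, d3 + 1)
-- ===== Notes on version B (the rewrite author's own statement) =====
-- stated objective: alternative
-- what changed: Replaces A's single fused left-to-right index loop with accumulators by a divide-and-conquer recursion that splits the gap-index range at its midpoint, counts 1-gaps and 3-gaps in each half independently and sums them (correct because the per-gap counts are associative/commutative sums).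
import Mathlib
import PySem

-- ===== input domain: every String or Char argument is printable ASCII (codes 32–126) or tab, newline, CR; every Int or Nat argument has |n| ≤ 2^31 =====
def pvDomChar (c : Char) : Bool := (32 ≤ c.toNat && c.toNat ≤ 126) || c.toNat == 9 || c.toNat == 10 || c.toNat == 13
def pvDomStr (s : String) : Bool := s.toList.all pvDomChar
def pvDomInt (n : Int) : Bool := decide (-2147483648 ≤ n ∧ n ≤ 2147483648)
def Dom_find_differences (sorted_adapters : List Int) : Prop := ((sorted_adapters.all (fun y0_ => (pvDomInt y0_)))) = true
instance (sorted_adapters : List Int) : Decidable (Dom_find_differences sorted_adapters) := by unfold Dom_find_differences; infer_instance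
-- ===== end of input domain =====

-- B replaces A's fused left-to-right index loop by a divide-and-conquer recursion over the
-- gap-index range, counting 1-gaps and 3-gaps in each half and summing; same O(n) cost.

-- ===== PORT A =====
def find_differences (sorted_adapters : List Int) : Int × Int :=
  (PySem.List.pyRange 0 (PySem.List.len sorted_adapters - 1) 1).foldl
    (fun st i =>
      if |PySem.List.pyGetD sorted_adapters i 0 - PySem.List.pyGetD sorted_adapters (i + 1) 0| = 1 then
        (st.1 + 1, st.2)
      else if |PySem.List.pyGetD sorted_adapters i 0 - PySem.List.pyGetD sorted_adapters (i + 1) 0| = 3 then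
        (st.1, st.2 + 1)
      else st)
    (0, 1)

-- ===== PORT B =====
-- B's inner 'go': segment [lo, hi) of gap indices; the 'hi ≤ lo' guard only makes the
-- recursion total (Python never calls go on an empty segment).
def fdGo (xs : List Int) (lo hi : Nat) : Int × Int :=
  if hi ≤ lo then (0, 0)
  else if hi - lo = 1 then
    let d := |xs.getD lo 0 - xs.getD hi 0|
    ((if d = 1 then 1 else 0), (if d = 3 then 1 else 0))
  else
    let mid := (lo + hi) / 2
    let a := fdGo xs lo mid
    let b := fdGo xs mid hi
    (a.1 + b.1, a.2 + b.2)
termination_by hi - lo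
decreasing_by all_goals omega

def find_differences_alt (sorted_adapters : List Int) : Int × Int :=
  if sorted_adapters.length < 2 then (0, 1)
  else
    let r := fdGo sorted_adapters 0 (sorted_adapters.length - 1)
    (r.1, r.2 + 1)

-- ===== PRECONDITION & SPEC =====
def Spec_find_differences (sorted_adapters : List Int) (out : Int × Int) : Prop := out = find_differences_alt sorted_adapters
instance (sorted_adapters : List Int) (out : Int × Int) : Decidable (Spec_find_differences sorted_adapters out) := by unfold Spec_find_differences; infer_instance

-- ===== CLAIM (what is proved, stated in full; the proofs are below) =====
def Claim_equal_find_differences : Prop := ∀ (sorted_adapters : List Int), Dom_find_differences sorted_adapters → Spec_find_differences sorted_adapters (find_differences sorted_adapters)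

-- ===== LEMMAS AND PROOFS =====

-- The gap list both programs are about.
def fdDiffs (xs : List Int) : List Int :=
  (xs.zip xs.tail).map (fun p => |p.1 - p.2|)

lemma fdDiffs_length (xs : List Int) : (fdDiffs xs).length = xs.length - 1 := by
  simp [fdDiffs, List.length_zip, List.length_tail]

lemma fdDiffs_getElem (xs : List Int) (k : Nat) (h : k < (fdDiffs xs).length) :
    (fdDiffs xs)[k] = |xs.getD k 0 - xs.getD (k + 1) 0| := by
  have hl : k < xs.length - 1 := by simpa [fdDiffs_length] using h
  have hk : k < xs.length := by omega
  have hk1 : k + 1 < xs.length := by omega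
  have ht : k < xs.tail.length := by simp [List.length_tail]; omega
  simp [fdDiffs, List.getElem_zip, List.getElem_tail,
    List.getD_eq_getElem?_getD, hk, hk1]

-- The element pairs visited by A's index loop are exactly zip xs xs.tail.
lemma pairs_eq (xs : List Int) :
    (PySem.List.pyRange 0 (PySem.List.len xs - 1) 1).map
      (fun i => (PySem.List.pyGetD xs i 0, PySem.List.pyGetD xs (i + 1) 0))
    = xs.zip xs.tail := by
  apply List.ext_getElem
  · simp [PySem.List.length_pyRange_one, List.length_tail]
  · intro k h1 h2
    have hk : k < xs.length - 1 := by
      simpa [PySem.List.length_pyRange_one] using h1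
    simp only [List.getElem_map, PySem.List.getElem_pyRange_one, List.getElem_zip, zero_add]
    have e1 : ((k : Int) + 1) = (((k + 1 : Nat)) : Int) := by push_cast; ring
    rw [e1, PySem.List.pyGetD_natCast, PySem.List.pyGetD_natCast]
    have hkl : k < xs.length := by omega
    have hk1 : k + 1 < xs.length := by omega
    have ht : k < xs.tail.length := by simp [List.length_tail]; omega
    simp [List.getD_eq_getElem?_getD, hkl, hk1, List.getElem_tail]

-- A's accumulator loop, over the projected values, computes the two counts.
lemma fold_count' {α : Type} (f : α → Int) (l : List α) (c1 c3 : Int) :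
    l.foldl (fun (st : Int × Int) x =>
        if f x = 1 then (st.1 + 1, st.2)
        else if f x = 3 then (st.1, st.2 + 1)
        else st) (c1, c3)
    = (c1 + (PySem.List.count (l.map f) 1 : Int), c3 + (PySem.List.count (l.map f) 3 : Int)) := by
  induction l generalizing c1 c3 with
  | nil => simp [PySem.List.count_eq]
  | cons x t ih =>
    by_cases h1 : f x = 1
    · simp only [List.foldl_cons, h1, ih, List.map_cons, PySem.List.count_eq, List.count_cons]
      simp [Prod.ext_iff]
      omega
    · by_cases h3 : f x = 3
      · simp only [List.foldl_cons, h3, ih, List.map_cons, PySem.List.count_eq, List.count_cons]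
        simp [Prod.ext_iff]
        omega
      · simp only [List.foldl_cons, ih, List.map_cons, PySem.List.count_eq, List.count_cons]
        simp [h1, h3]

-- B's divide-and-conquer on segment [lo, hi) computes the counts over that slice of fdDiffs.
lemma fdGo_eq (xs : List Int) (lo hi : Nat) (hhi : hi ≤ (fdDiffs xs).length) :
    fdGo xs lo hi
      = ((PySem.List.count (((fdDiffs xs).drop lo).take (hi - lo)) 1 : Int),
         (PySem.List.count (((fdDiffs xs).drop lo).take (hi - lo)) 3 : Int)) := by
  by_cases h0 : hi ≤ lo
  · rw [fdGo]
    simp [h0, Nat.sub_eq_zero_of_le h0, PySem.List.count_eq]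
  · by_cases h1 : hi - lo = 1
    · rw [fdGo]
      have hlo : lo < (fdDiffs xs).length := by omega
      have hhi' : hi = lo + 1 := by omega
      have hseg : ((fdDiffs xs).drop lo).take (hi - lo) = [(fdDiffs xs)[lo]] := by
        rw [h1]
        rw [List.take_one, List.head?_drop]
        simp [List.getElem?_eq_getElem hlo]
      rw [hseg, fdDiffs_getElem xs lo hlo]
      simp [h0, h1, hhi', PySem.List.count_eq, List.count_singleton]
    · rw [fdGo]
      simp only [h0, h1, if_false]
      have hmidlo : lo < (lo + hi) / 2 := by omega
      have hmidhi : (lo + hi) / 2 < hi := by omega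
      rw [fdGo_eq xs lo ((lo + hi) / 2) (by omega), fdGo_eq xs ((lo + hi) / 2) hi hhi]
      have hsplit : ((fdDiffs xs).drop lo).take (hi - lo)
          = ((fdDiffs xs).drop lo).take ((lo + hi) / 2 - lo)
            ++ (((fdDiffs xs).drop ((lo + hi) / 2)).take (hi - (lo + hi) / 2)) := by
        have e : hi - lo = ((lo + hi) / 2 - lo) + (hi - (lo + hi) / 2) := by omega
        rw [e, List.take_add, List.drop_drop,
          show lo + ((lo + hi) / 2 - lo) = (lo + hi) / 2 by omega]
      rw [hsplit]
      simp [PySem.List.count_eq, List.count_append]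
termination_by hi - lo
decreasing_by all_goals omega

-- ===== VERDICT (by name: the statement is the Claim_ definition above) =====
theorem find_differences_spec : Claim_equal_find_differences := by
  intro xs _
  show find_differences xs = find_differences_alt xs
  unfold find_differences
  rw [fold_count' (fun i => |PySem.List.pyGetD xs i 0 - PySem.List.pyGetD xs (i + 1) 0|)
      (PySem.List.pyRange 0 (PySem.List.len xs - 1) 1) 0 1]
  have hA : (PySem.List.pyRange 0 (PySem.List.len xs - 1) 1).map
      (fun i => |PySem.List.pyGetD xs i 0 - PySem.List.pyGetD xs (i + 1) 0|)
      = fdDiffs xs := by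
    show (PySem.List.pyRange 0 (PySem.List.len xs - 1) 1).map
      ((fun p : Int × Int => |p.1 - p.2|) ∘ (fun i => (PySem.List.pyGetD xs i 0, PySem.List.pyGetD xs (i + 1) 0)))
      = fdDiffs xs
    rw [← List.map_map, pairs_eq xs]
    rfl
  rw [hA]
  unfold find_differences_alt
  by_cases hlen : xs.length < 2
  · have : fdDiffs xs = [] := by
      have := fdDiffs_length xs
      cases h : fdDiffs xs with
      | nil => rfl
      | cons a t => rw [h] at this; simp at this; omega
    simp [hlen, this, PySem.List.count_eq]
  · simp only [hlen, if_false]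
    rw [fdGo_eq xs 0 (xs.length - 1) (by rw [fdDiffs_length])]
    have : ((fdDiffs xs).drop 0).take (xs.length - 1 - 0) = fdDiffs xs := by
      simp [List.take_of_length_le, fdDiffs_length]
    rw [this]
    simp [Prod.ext_iff]
    omega
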